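-- pv_equiv track=rewrite | github.com/mengjihua/Binary-Battle | 每日一题/2025.10/2598.py | findSmallestInteger
-- ===== SOURCE A (Python) =====
-- from typing import List, Tuple, Dict, Set, Optional
--
-- def findSmallestInteger(nums: List[int], value: int) -> int:
--     cnt = [0] * value
--     for num in nums:
--         cnt[num % value] += 1
--
--     i = 0
--     while True:
--         if cnt[i % value] > 0:
--             cnt[i % value] -= 1
--             i += 1
--         else:
--             return i
-- ===== SOURCE B (Python) =====
-- from typing import List
--
-- def findSmallestInteger(nums: List[int], value: int) -> int:
--     cnt = [0] * value
--     for num in nums: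
--         cnt[num % value] += 1
--     # residue r covers r, r+value, ..., r+(cnt[r]-1)*value; first gap there is cnt[r]*value + r
--     return min(cnt[r] * value + r for r in range(value))
-- ===== Notes on version B (the rewrite author's own statement) =====
-- stated objective: simpler
-- what changed: Replaces A's step-by-step while-loop simulation (decrementing residue counts for i = 0,1,2,... until one is exhausted) by the closed form min over residues r of cnt[r]*value + r, the first uncoverable integer with residue r.
import Mathlib
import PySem

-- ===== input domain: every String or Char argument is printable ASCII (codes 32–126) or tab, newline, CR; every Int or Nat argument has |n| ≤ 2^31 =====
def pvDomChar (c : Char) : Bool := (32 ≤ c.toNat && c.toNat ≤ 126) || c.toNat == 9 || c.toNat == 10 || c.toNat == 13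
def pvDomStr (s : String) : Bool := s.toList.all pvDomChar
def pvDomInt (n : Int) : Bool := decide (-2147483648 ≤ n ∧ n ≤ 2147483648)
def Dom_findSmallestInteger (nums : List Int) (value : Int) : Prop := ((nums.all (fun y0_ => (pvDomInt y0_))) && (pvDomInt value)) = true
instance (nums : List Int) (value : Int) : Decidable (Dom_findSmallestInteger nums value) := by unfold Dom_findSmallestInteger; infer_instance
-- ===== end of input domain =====

-- B replaces A's step-by-step while-loop simulation by the closed form
-- min over residues r of cnt[r]*value + r (simpler; return value equivalence proved for value ≥ 1).

-- ===== PORT A =====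
-- cnt = [0] * value; for num in nums: cnt[num % value] += 1
-- (index num % value is in range whenever value ≥ 1, i.e. on all of Pre_; Python raises outside)
def pvCntA (nums : List Int) (value : Int) : List Int :=
  nums.foldl (fun cnt num =>
    cnt.set (PySem.Int.mod num value).toNat
      (cnt.getD (PySem.Int.mod num value).toNat 0 + 1)) (List.replicate value.toNat 0)

-- the `while True` loop; each iteration either returns i or decrements one positive count,
-- so `nums.length + 1` steps always suffice on Pre_ (fuel exhaustion is unreachable there)
def pvLoopA (fuel : Nat) (cnt : List Int) (value : Int) (i : Int) : Int :=
  match fuel with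
  | 0 => i
  | fuel + 1 =>
    if cnt.getD (PySem.Int.mod i value).toNat 0 > 0 then
      pvLoopA fuel
        (cnt.set (PySem.Int.mod i value).toNat
          (cnt.getD (PySem.Int.mod i value).toNat 0 - 1)) value (i + 1)
    else i

def findSmallestInteger (nums : List Int) (value : Int) : Int :=
  pvLoopA (nums.length + 1) (pvCntA nums value) value 0

-- ===== PORT B =====
-- identical residue-counting pass
def pvCntB (nums : List Int) (value : Int) : List Int :=
  nums.foldl (fun cnt num =>
    cnt.set (PySem.Int.mod num value).toNat
      (cnt.getD (PySem.Int.mod num value).toNat 0 + 1)) (List.replicate value.toNat 0)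

-- min(cnt[r]*value + r for r in range(value)); Python's min raises on empty (only when value < 1, outside Pre_)
def findSmallestInteger_alt (nums : List Int) (value : Int) : Int :=
  let cnt := pvCntB nums value
  let cands := (List.range value.toNat).map (fun r => cnt.getD r 0 * value + (r : Int))
  match cands with
  | [] => 0
  | x :: xs => xs.foldl min x

-- ===== PRECONDITION & SPEC =====
-- Pre_ excludes exactly value ≤ 0, on which Python A raises (ZeroDivisionError or IndexError)
def Pre_findSmallestInteger (nums : List Int) (value : Int) : Prop := 1 ≤ value
instance (nums : List Int) (value : Int) : Decidable (Pre_findSmallestInteger nums value) := by unfold Pre_findSmallestInteger; infer_instance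

def pvWitness_findSmallestInteger : List Int × Int := ([1, 2, 5], 3)

def Spec_findSmallestInteger (nums : List Int) (value : Int) (out : Int) : Prop := out = findSmallestInteger_alt nums value
instance (nums : List Int) (value : Int) (out : Int) : Decidable (Spec_findSmallestInteger nums value out) := by unfold Spec_findSmallestInteger; infer_instance

-- ===== CLAIM (what is proved, stated in full; the proofs are below) =====
def Claim_equal_findSmallestInteger : Prop := ∀ (nums : List Int) (value : Int), Dom_findSmallestInteger nums value → Pre_findSmallestInteger nums value → Spec_findSmallestInteger nums value (findSmallestInteger nums value)

-- ===== LEMMAS AND PROOFS =====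

-- candidate value for residue offset r when the loop position is i
def pvG (cnt : List Int) (value i : Int) (r : Nat) : Int :=
  cnt.getD (PySem.Int.mod (i + r) value).toNat 0 * value + i + r

def pvL (cnt : List Int) (value i : Int) : List Int :=
  (List.range value.toNat).map (pvG cnt value i)

lemma pvCnt_props (nums : List Int) (value : Int) (hv : 1 ≤ value) :
    (pvCntA nums value).length = value.toNat ∧ (∀ x ∈ pvCntA nums value, 0 ≤ x) ∧
    (pvCntA nums value).sum = nums.length := by
  unfold pvCntA
  suffices h : ∀ (l : List Int) (cnt : List Int), cnt.length = value.toNat →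
      (∀ x ∈ cnt, 0 ≤ x) → ∀ s : Int, cnt.sum = s →
      (l.foldl (fun cnt num =>
        cnt.set (PySem.Int.mod num value).toNat
          (cnt.getD (PySem.Int.mod num value).toNat 0 + 1)) cnt).length = value.toNat ∧
      (∀ x ∈ (l.foldl (fun cnt num =>
        cnt.set (PySem.Int.mod num value).toNat
          (cnt.getD (PySem.Int.mod num value).toNat 0 + 1)) cnt), 0 ≤ x) ∧
      (l.foldl (fun cnt num =>
        cnt.set (PySem.Int.mod num value).toNat
          (cnt.getD (PySem.Int.mod num value).toNat 0 + 1)) cnt).sum = s + l.length by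
    obtain ⟨a, b, c⟩ := h nums (List.replicate value.toNat 0) (by simp) (by simp) 0 (by simp)
    exact ⟨a, b, by rw [c]; ring⟩
  intro l
  induction l with
  | nil => intro cnt h1 h2 s h3; simpa using ⟨h1, h2, h3⟩
  | cons num t ih =>
    intro cnt h1 h2 s h3
    simp only [List.foldl_cons]
    have hidx : (PySem.Int.mod num value).toNat < cnt.length := by
      have h0 := PySem.Int.mod_nonneg num (b := value) (by omega)
      have hlt := PySem.Int.mod_lt num (b := value) (by omega)
      rw [h1]; omega
    have := ih (cnt.set (PySem.Int.mod num value).toNat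
        (cnt.getD (PySem.Int.mod num value).toNat 0 + 1))
      (by simpa using h1)
      (by
        intro x hx
        rcases List.mem_or_eq_of_mem_set hx with hx' | hx'
        · exact h2 x hx'
        · have hge : 0 ≤ cnt.getD (PySem.Int.mod num value).toNat 0 := by
            rw [List.getD_eq_getElem cnt 0 hidx]
            exact h2 _ (List.getElem_mem hidx)
          omega)
      (s + 1)
      (by
        rw [List.sum_set']
        simp only [hidx, dif_pos]
        rw [List.getD_eq_getElem cnt 0 hidx]
        omega)
    constructor
    · exact this.1
    constructor
    · exact this.2.1
    · rw [this.2.2]; push_cast [List.length_cons]; ring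

lemma pvL_lower (cnt : List Int) (value i : Int) (hv : 1 ≤ value)
    (hlen : cnt.length = value.toNat) (hnn : ∀ x ∈ cnt, 0 ≤ x) :
    ∀ y ∈ pvL cnt value i, i ≤ y := by
  intro y hy
  simp only [pvL, List.mem_map, List.mem_range] at hy
  obtain ⟨r, hr, rfl⟩ := hy
  unfold pvG
  have h0 := PySem.Int.mod_nonneg (i + r) (b := value) (by omega)
  have hlt := PySem.Int.mod_lt (i + r) (b := value) (by omega)
  have hidx : (PySem.Int.mod (i + r) value).toNat < cnt.length := by rw [hlen]; omega
  have hc : 0 ≤ cnt.getD (PySem.Int.mod (i + r) value).toNat 0 := by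
    rw [List.getD_eq_getElem cnt 0 hidx]
    exact hnn _ (List.getElem_mem hidx)
  nlinarith [Int.natCast_nonneg r]

-- key step: decrementing cnt at residue i % value and stepping i to i+1 rotates the candidate list
lemma pvMod_step_ne (value i : Int) (hv : 1 ≤ value) :
    ∀ k : Int, 0 < k → k < value →
      PySem.Int.mod (i + k) value ≠ PySem.Int.mod i value := by
  have hmod : ∀ a : Int, PySem.Int.mod a value = a % value := fun a =>
    PySem.Int.mod_eq_emod_of_pos (by omega)
  intro k hk1 hk2 heq
  rw [hmod, hmod] at heq
  have hm0 : 0 ≤ i % value := Int.emod_nonneg i (by omega)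
  have hml : i % value < value := Int.emod_lt_of_pos i (by omega)
  have h1 : (i + k) % value = (i % value + k) % value := by
    conv_lhs => rw [Int.add_emod]
    rw [Int.emod_eq_of_lt (le_of_lt hk1) hk2]
  rcases lt_or_ge (i % value + k) value with h | h
  · rw [h1, Int.emod_eq_of_lt (by omega) h] at heq
    omega
  · have e1 : (i % value + k) % value = (i % value + k + value * (-1)) % value :=
      (Int.add_mul_emod_self_left (a := i % value + k) (b := value) (c := -1)).symm
    rw [h1, e1, Int.emod_eq_of_lt (by omega) (by omega)] at heq
    omega

lemma pvL_step (cnt : List Int) (value i : Int) (hv : 1 ≤ value)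
    (hlen : cnt.length = value.toNat) :
    pvL (cnt.set (PySem.Int.mod i value).toNat (cnt.getD (PySem.Int.mod i value).toNat 0 - 1))
        value (i + 1)
      = (List.range (value.toNat - 1)).map (fun r => pvG cnt value i (r + 1))
        ++ [pvG cnt value i 0] := by
  have h0 := PySem.Int.mod_nonneg i (b := value) (by omega)
  have hlt := PySem.Int.mod_lt i (b := value) (by omega)
  have hs : (PySem.Int.mod i value).toNat < cnt.length := by rw [hlen]; omega
  have hn1 : value.toNat = (value.toNat - 1) + 1 := by omega
  set cnt' := cnt.set (PySem.Int.mod i value).toNat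
      (cnt.getD (PySem.Int.mod i value).toNat 0 - 1) with hcnt'
  have hlen' : cnt'.length = cnt.length := by simp [hcnt']
  unfold pvL
  rw [hn1, List.range_succ, List.map_append]
  congr 1
  · -- pointwise: pvG cnt' value (i+1) r = pvG cnt value i (r+1) for r < value.toNat - 1
    apply List.map_congr_left
    intro r hr
    rw [List.mem_range] at hr
    unfold pvG
    have hcast : i + 1 + (r : Int) = i + ((r + 1 : Nat) : Int) := by push_cast; ring
    rw [hcast]
    have hkpos : (0 : Int) < ((r + 1 : Nat) : Int) := by positivity
    have hklt : ((r + 1 : Nat) : Int) < value := by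
      have : r + 1 < value.toNat := by omega
      omega
    have hne := pvMod_step_ne value i hv ((r + 1 : Nat) : Int) hkpos hklt
    have h0' := PySem.Int.mod_nonneg (i + ((r + 1 : Nat) : Int)) (b := value) (by omega)
    have hlt' := PySem.Int.mod_lt (i + ((r + 1 : Nat) : Int)) (b := value) (by omega)
    have hj : (PySem.Int.mod (i + ((r + 1 : Nat) : Int)) value).toNat < cnt.length := by
      rw [hlen]; omega
    have hjne : (PySem.Int.mod i value).toNat ≠
        (PySem.Int.mod (i + ((r + 1 : Nat) : Int)) value).toNat := by
      intro hEq
      exact hne (by omega)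
    have hget : cnt'.getD (PySem.Int.mod (i + ((r + 1 : Nat) : Int)) value).toNat 0
        = cnt.getD (PySem.Int.mod (i + ((r + 1 : Nat) : Int)) value).toNat 0 := by
      rw [List.getD_eq_getElem cnt' 0 (by rw [hlen']; exact hj),
          List.getD_eq_getElem cnt 0 hj]
      exact List.getElem_set_ne hjne _
    rw [hget]
    push_cast
    ring
  · -- last element: pvG cnt' value (i+1) (value.toNat - 1) = pvG cnt value i 0
    unfold pvG
    have hvc : ((value.toNat - 1 : Nat) : Int) = value - 1 := by omega
    have hcast : i + 1 + ((value.toNat - 1 : Nat) : Int) = i + value := by omega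
    rw [List.map_singleton]
    have hidx : PySem.Int.mod (i + 1 + ((value.toNat - 1 : Nat) : Int)) value
        = PySem.Int.mod i value := by
      rw [hcast]
      have hmod : ∀ a : Int, PySem.Int.mod a value = a % value := fun a =>
        PySem.Int.mod_eq_emod_of_pos (by omega)
      rw [hmod, hmod]
      have : i + value = i + value * 1 := by ring
      rw [this, Int.add_mul_emod_self_left]
    rw [hidx]
    have hget : cnt'.getD (PySem.Int.mod i value).toNat 0
        = cnt.getD (PySem.Int.mod i value).toNat 0 - 1 := by
      rw [List.getD_eq_getElem cnt' 0 (by rw [hlen']; exact hs)]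
      exact List.getElem_set_self _
    rw [hget, List.cons_eq_cons]
    refine ⟨?_, rfl⟩
    simp only [Nat.cast_zero, add_zero]
    rw [hvc]
    ring

lemma pvMin?_rotate (l : List Int) (x : Int) : (l ++ [x]).min? = (x :: l).min? := by
  obtain ⟨m, hm⟩ : ∃ m, (x :: l).min? = some m := ⟨_, rfl⟩
  rw [hm]
  rw [List.min?_eq_some_iff] at hm ⊢
  obtain ⟨hmem, hle⟩ := hm
  have hperm := List.perm_append_singleton x l
  exact ⟨hperm.mem_iff.mpr hmem, fun b hb => hle b (hperm.mem_iff.mp hb)⟩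

lemma pvLoop_eq (value : Int) (hv : 1 ≤ value) :
    ∀ (fuel : Nat) (cnt : List Int) (i : Int), cnt.length = value.toNat →
      (∀ x ∈ cnt, 0 ≤ x) → cnt.sum.toNat < fuel →
      pvLoopA fuel cnt value i = (pvL cnt value i).min?.getD 0 := by
  intro fuel
  induction fuel with
  | zero => intro cnt i _ _ h; omega
  | succ f ih =>
    intro cnt i hlen hnn hsum
    have h0 := PySem.Int.mod_nonneg i (b := value) (by omega)
    have hlt := PySem.Int.mod_lt i (b := value) (by omega)
    have hs : (PySem.Int.mod i value).toNat < cnt.length := by rw [hlen]; omega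
    have hc0 : 0 ≤ cnt.getD (PySem.Int.mod i value).toNat 0 := by
      rw [List.getD_eq_getElem cnt 0 hs]
      exact hnn _ (List.getElem_mem hs)
    simp only [pvLoopA]
    by_cases hc : cnt.getD (PySem.Int.mod i value).toNat 0 > 0
    · rw [if_pos hc]
      set cnt' := cnt.set (PySem.Int.mod i value).toNat
          (cnt.getD (PySem.Int.mod i value).toNat 0 - 1) with hcnt'
      have hlen' : cnt'.length = value.toNat := by rw [hcnt', List.length_set, hlen]
      have hnn' : ∀ x ∈ cnt', 0 ≤ x := by
        intro x hx
        rcases List.mem_or_eq_of_mem_set hx with hx' | hx'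
        · exact hnn x hx'
        · omega
      have hsum' : cnt'.sum = cnt.sum - 1 := by
        rw [hcnt', List.sum_set']
        simp only [hs, dif_pos]
        rw [List.getD_eq_getElem cnt 0 hs]
        ring
      have hone : 1 ≤ cnt.sum := by
        have := List.single_le_sum hnn _ (List.getElem_mem hs)
        rw [List.getD_eq_getElem cnt 0 hs] at hc
        omega
      rw [ih cnt' (i + 1) hlen' hnn' (by omega)]
      rw [pvL_step cnt value i hv hlen, pvMin?_rotate]
      congr 1
      unfold pvL
      have : value.toNat = (value.toNat - 1) + 1 := by omega
      rw [this, List.range_succ_eq_map, List.map_cons, List.map_map]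
      rfl
    · rw [if_neg hc]
      have hc' : cnt.getD (PySem.Int.mod i value).toNat 0 = 0 := by omega
      have hmem : i ∈ pvL cnt value i := by
        unfold pvL
        rw [List.mem_map]
        refine ⟨0, by simpa [List.mem_range] using (by omega : 0 < value.toNat), ?_⟩
        unfold pvG
        simp only [Nat.cast_zero, add_zero]
        rw [hc']
        ring
      have hmin : (pvL cnt value i).min? = some i := by
        rw [List.min?_eq_some_iff]
        exact ⟨hmem, pvL_lower cnt value i hv hlen hnn⟩
      rw [hmin]
      rfl

-- ===== VERDICT (by name: the statement is the Claim_ definition above) =====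
theorem findSmallestInteger_spec : Claim_equal_findSmallestInteger := by
  intro nums value _ hpre
  have hv : (1 : Int) ≤ value := hpre
  unfold Spec_findSmallestInteger findSmallestInteger findSmallestInteger_alt
  obtain ⟨hlen, hnn, hsum⟩ := pvCnt_props nums value hpre
  rw [pvLoop_eq value hpre (nums.length + 1) (pvCntA nums value) 0 hlen hnn (by
    rw [hsum]; simp)]
  have hcands : pvL (pvCntA nums value) value 0
      = (List.range value.toNat).map
          (fun r => (pvCntB nums value).getD r 0 * value + (r : Int)) := by
    apply List.map_congr_left
    intro r hr
    rw [List.mem_range] at hr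
    unfold pvG
    have hmodr : PySem.Int.mod (0 + (r : Int)) value = (r : Int) := by
      rw [zero_add, PySem.Int.mod_eq_emod_of_pos (by omega)]
      exact Int.emod_eq_of_lt (by positivity) (by omega)
    rw [hmodr]
    have : ((r : Int)).toNat = r := by omega
    rw [this]
    have hAB : pvCntB nums value = pvCntA nums value := rfl
    rw [hAB]
    ring
  rw [hcands]
  have hpos : 0 < value.toNat := by omega
  obtain ⟨n, hn⟩ : ∃ n, value.toNat = n + 1 := ⟨value.toNat - 1, by omega⟩
  rw [hn, List.range_succ_eq_map, List.map_cons]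
  rfl
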